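-- pv_equiv track=rewrite | github.com/patrickwieth/YMCA | tools/autotile-map.py | autotile_offsets_for_cell
-- ===== SOURCE A (Python) =====
-- def cpos_to_mpos(x: int, y: int, grid_type: str) -> tuple[int, int]:
--     if grid_type != "RectangularIsometric":
--         return (x, y)
--     u = (x - y) // 2
--     v = x + y
--     return (u, v)
--
-- def mpos_to_cpos(u: int, v: int, grid_type: str) -> tuple[int, int]:
--     if grid_type != "RectangularIsometric":
--         return (u, v)
--     offset = 1 if (v & 1) == 1 else 0
--     y = (v - offset) // 2 - u
--     x = v - y
--     return (x, y)
--
-- def autotile_offsets_for_cell(x: int, y: int, grid_type: str, radius: int = 3) -> list[tuple[int, int]]: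
--     offsets: list[tuple[int, int]] = []
--     if grid_type in ("Rectangular", "RectangularIsometric"):
--         for dy in range(-radius, radius + 1):
--             for dx in range(-radius, radius + 1):
--                 offsets.append((dx, dy))
--         return offsets
--
--     u, v = cpos_to_mpos(x, y, grid_type)
--     for dv in range(-radius, radius + 1):
--         for du in range(-radius, radius + 1):
--             nx, ny = mpos_to_cpos(u + du, v + dv, grid_type)
--             offsets.append((nx - x, ny - y))
--     return offsets
-- ===== SOURCE B (Python) =====
-- def autotile_offsets_for_cell(x: int, y: int, grid_type: str, radius: int = 3) -> list[tuple[int, int]]: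
--     # The coordinate conversions are identity for every grid_type reaching A's
--     # second branch, so the result is always the same (2*radius+1)^2 square of
--     # offsets.  Enumerate it with ONE flat index k, decoded by divmod, instead
--     # of two nested loops.
--     if radius < 0:
--         return []
--     n = 2 * radius + 1
--     return [(k % n - radius, k // n - radius) for k in range(n * n)]
-- ===== Notes on version B (the rewrite author's own statement) =====
-- stated objective: alternative
-- what changed: B drops the grid_type branch split and the identity cpos_to_mpos/mpos_to_cpos helpers and replaces the two nested loops by a single flat loop over one index k in range((2r+1)^2), recovering (dx,dy) with divmod (k % n - r, k // n - r).
import Mathlib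
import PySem

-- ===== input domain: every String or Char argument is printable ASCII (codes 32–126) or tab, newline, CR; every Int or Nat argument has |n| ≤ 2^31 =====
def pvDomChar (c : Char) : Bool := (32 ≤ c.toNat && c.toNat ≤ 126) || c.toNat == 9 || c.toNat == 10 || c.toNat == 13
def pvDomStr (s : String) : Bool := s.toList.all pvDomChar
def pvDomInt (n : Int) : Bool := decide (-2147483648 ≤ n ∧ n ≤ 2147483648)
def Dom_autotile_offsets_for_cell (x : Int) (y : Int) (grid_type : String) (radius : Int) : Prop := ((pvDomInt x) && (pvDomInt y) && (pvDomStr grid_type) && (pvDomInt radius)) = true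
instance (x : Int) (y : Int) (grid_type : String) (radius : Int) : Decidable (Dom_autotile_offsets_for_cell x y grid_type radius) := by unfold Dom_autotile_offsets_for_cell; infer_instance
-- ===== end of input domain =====

-- B replaces A's branch split, identity conversions and nested loops by one flat
-- loop over a single index decoded with divmod; same value, alternative structure.

-- ===== PORT A =====
def cpos_to_mpos (x : Int) (y : Int) (grid_type : String) : Int × Int :=
  if grid_type ≠ "RectangularIsometric" then (x, y)
  else (PySem.Int.floordiv (x - y) 2, x + y)

def mpos_to_cpos (u : Int) (v : Int) (grid_type : String) : Int × Int :=
  if grid_type ≠ "RectangularIsometric" then (u, v)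
  else
    let offset : Int := if PySem.Int.band v 1 = 1 then 1 else 0
    let y := PySem.Int.floordiv (v - offset) 2 - u
    let x := v - y
    (x, y)

def autotile_offsets_for_cell (x : Int) (y : Int) (grid_type : String) (radius : Int) : List (Int × Int) :=
  let offsets : List (Int × Int) := []
  if grid_type = "Rectangular" ∨ grid_type = "RectangularIsometric" then
    (PySem.List.pyRange (-radius) (radius + 1) 1).foldl (fun acc dy =>
      (PySem.List.pyRange (-radius) (radius + 1) 1).foldl (fun acc2 dx =>
        acc2 ++ [(dx, dy)]) acc) offsets
  else
    let uv := cpos_to_mpos x y grid_type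
    (PySem.List.pyRange (-radius) (radius + 1) 1).foldl (fun acc dv =>
      (PySem.List.pyRange (-radius) (radius + 1) 1).foldl (fun acc2 du =>
        let nxy := mpos_to_cpos (uv.1 + du) (uv.2 + dv) grid_type
        acc2 ++ [(nxy.1 - x, nxy.2 - y)]) acc) offsets

-- ===== PORT B =====
def autotile_offsets_for_cell_alt (_x : Int) (_y : Int) (_grid_type : String) (radius : Int) : List (Int × Int) :=
  if radius < 0 then []
  else
    let n := 2 * radius + 1
    (PySem.List.pyRange 0 (n * n) 1).map
      (fun k => (PySem.Int.mod k n - radius, PySem.Int.floordiv k n - radius))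

-- ===== PRECONDITION & SPEC =====
def Spec_autotile_offsets_for_cell (x : Int) (y : Int) (grid_type : String) (radius : Int) (out : List (Int × Int)) : Prop := out = autotile_offsets_for_cell_alt x y grid_type radius
instance (x : Int) (y : Int) (grid_type : String) (radius : Int) (out : List (Int × Int)) : Decidable (Spec_autotile_offsets_for_cell x y grid_type radius out) := by unfold Spec_autotile_offsets_for_cell; infer_instance

-- ===== CLAIM (what is proved, stated in full; the proofs are below) =====
def Claim_equal_autotile_offsets_for_cell : Prop := ∀ (x : Int) (y : Int) (grid_type : String) (radius : Int), Dom_autotile_offsets_for_cell x y grid_type radius → Spec_autotile_offsets_for_cell x y grid_type radius (autotile_offsets_for_cell x y grid_type radius)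

-- ===== LEMMAS AND PROOFS =====

-- A's double append-loop is the flatMap of the per-row map
theorem pv_double_loop (l : List Int) (f : Int → Int → Int × Int) (acc : List (Int × Int)) :
    l.foldl (fun a dy => l.foldl (fun a2 dx => a2 ++ [f dx dy]) a) acc
      = acc ++ l.flatMap (fun dy => l.map (fun dx => f dx dy)) := by
  have h : (fun (a : List (Int × Int)) dy => l.foldl (fun a2 dx => a2 ++ [f dx dy]) a)
      = fun a dy => a ++ l.map (fun dx => f dx dy) := by
    funext a dy
    exact PySem.List.foldl_append_singleton_eq_map (fun dx => f dx dy) l a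
  rw [h]
  exact PySem.List.foldl_append_eq_flatMap (fun dy => l.map (fun dx => f dx dy)) l acc

-- decoding a single range(m*N) index with divmod is the nested range(m) × range(N)
theorem pv_range_mul_map {α : Type} (m N : Nat) (f : Nat → α) :
    (List.range (m * N)).map f
      = (List.range m).flatMap (fun i => (List.range N).map (fun j => f (i * N + j))) := by
  induction m with
  | zero => simp
  | succ m ih =>
    rw [Nat.succ_mul, List.range_add, List.map_append, ih, List.range_succ,
      List.flatMap_append]
    simp [List.map_map, Function.comp]

-- B's flat divmod enumeration equals A's square of offsets
theorem pv_square_eq (radius : Int) :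
    autotile_offsets_for_cell_alt 0 0 "" radius
      = (PySem.List.pyRange (-radius) (radius + 1) 1).flatMap
          (fun dy => (PySem.List.pyRange (-radius) (radius + 1) 1).map (fun dx => (dx, dy))) := by
  unfold autotile_offsets_for_cell_alt
  by_cases hneg : radius < 0
  · rw [if_pos hneg, PySem.List.pyRange_one_eq_nil (by omega)]
    simp
  · rw [if_neg hneg]
    obtain ⟨R, hR⟩ : ∃ R : Nat, radius = (R : Int) :=
      ⟨radius.toNat, (Int.toNat_of_nonneg (by omega)).symm⟩
    subst hR
    show (PySem.List.pyRange 0 ((2 * (R : Int) + 1) * (2 * (R : Int) + 1)) 1).map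
        (fun k => (PySem.Int.mod k (2 * (R : Int) + 1) - R,
                   PySem.Int.floordiv k (2 * (R : Int) + 1) - R)) = _
    set N : Nat := 2 * R + 1 with hN
    have hn : (2 * (R : Int) + 1) = (N : Int) := by omega
    have hlen : ((R : Int) + 1 - (-(R : Int))).toNat = N := by omega
    have hlen2 : ((N : Int) * N - 0).toNat = N * N := by simp [Int.toNat_mul]
    rw [hn, PySem.List.pyRange_one 0, hlen2, PySem.List.pyRange_one, hlen,
      List.map_map, List.flatMap_map,
      pv_range_mul_map N N
        (fun k => ((fun k : Int => (PySem.Int.mod k N - R, PySem.Int.floordiv k N - R)) ∘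
          fun k : Nat => (0 : Int) + k) k)]
    apply List.flatMap_congr
    intro i hi
    rw [List.map_map]
    apply List.map_congr_left
    intro j hj
    have hjN : j < N := List.mem_range.mp hj
    have hmod : (i * N + j) % N = j := by
      rw [Nat.mul_comm i N, Nat.mul_add_mod, Nat.mod_eq_of_lt hjN]
    have hdiv : (i * N + j) / N = i := by
      rw [Nat.mul_comm i N, Nat.mul_add_div (by omega), Nat.div_eq_of_lt hjN, Nat.add_zero]
    have h1 : PySem.Int.mod ((i * N + j : Nat) : Int) (N : Int) = (j : Int) := by
      rw [PySem.Int.mod_natCast, hmod]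
    have h2 : PySem.Int.floordiv ((i * N + j : Nat) : Int) (N : Int) = (i : Int) := by
      rw [PySem.Int.floordiv_natCast, hdiv]
    simp only [Function.comp, zero_add, h1, h2, Prod.mk.injEq]
    omega

-- ===== VERDICT (by name: the statement is the Claim_ definition above) =====
theorem autotile_offsets_for_cell_spec : Claim_equal_autotile_offsets_for_cell := by
  intro x y gt radius _
  unfold Spec_autotile_offsets_for_cell
  have halt : autotile_offsets_for_cell_alt x y gt radius
      = autotile_offsets_for_cell_alt 0 0 "" radius := rfl
  rw [halt, pv_square_eq]
  unfold autotile_offsets_for_cell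
  by_cases h : gt = "Rectangular" ∨ gt = "RectangularIsometric"
  · simp only [h, if_pos]
    exact pv_double_loop _ (fun dx dy => (dx, dy)) []
  · have hni : gt ≠ "RectangularIsometric" := fun he => h (Or.inr he)
    simp only [h, if_false]
    simp only [cpos_to_mpos, mpos_to_cpos, if_pos hni]
    have := pv_double_loop (PySem.List.pyRange (-radius) (radius + 1) 1)
      (fun du dv => (x + du - x, y + dv - y)) []
    simpa using this
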